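-- pv_equiv track=rewrite | github.com/ibrahimadel7/mindpal-v5 | backend/app/utils/memory_response_filter.py | _has_uncertainty_language
-- ===== SOURCE A (Python) =====
-- def _has_uncertainty_language(text: str) -> bool:
--     """Check if response contains uncertainty language."""
--     uncertainty_words = {
--         "might", "could", "seems", "appears",
--         "potentially", "perhaps", "maybe", "may be",
--         "i might", "could be", "it seems"
--     }
--     lowered = text.lower()
--     return any(word in lowered for word in uncertainty_words)
-- ===== SOURCE B (Python) =====
-- def _has_uncertainty_language(text: str) -> bool:
--     """Check if response contains uncertainty language."""
--     words = ("might", "could", "seems", "appears",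
--              "potentially", "perhaps", "maybe", "may be",
--              "i might", "could be", "it seems")
--     lowered = text.lower()
--     for i in range(len(lowered)):
--         if lowered.startswith(words, i):
--             return True
--     return False
-- ===== Notes on version B (the rewrite author's own statement) =====
-- stated objective: alternative
-- what changed: Replaces the eleven independent per-word substring membership scans by a single left-to-right pass over the lowered text that at each position tests startswith against the tuple of all eleven phrases.
import Mathlib
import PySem

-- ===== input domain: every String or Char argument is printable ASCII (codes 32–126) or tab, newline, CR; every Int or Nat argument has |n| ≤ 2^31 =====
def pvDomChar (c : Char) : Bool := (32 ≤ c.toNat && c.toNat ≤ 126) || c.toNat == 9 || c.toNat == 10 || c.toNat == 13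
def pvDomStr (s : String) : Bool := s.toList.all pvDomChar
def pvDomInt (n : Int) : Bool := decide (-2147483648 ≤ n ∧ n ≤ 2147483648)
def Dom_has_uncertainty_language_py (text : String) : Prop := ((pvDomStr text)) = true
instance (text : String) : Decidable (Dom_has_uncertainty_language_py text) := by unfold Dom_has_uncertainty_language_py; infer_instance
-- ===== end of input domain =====

-- B replaces A's 11 independent substring scans by one left-to-right pass testing all
-- 11 phrases at each position (objective: alternative; return values are identical).

-- ===== PORT A =====
-- the uncertainty phrases (Python set literal; order irrelevant to `any`)
def pvWords : List (List Char) :=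
  ["might".toList, "could".toList, "seems".toList, "appears".toList,
   "potentially".toList, "perhaps".toList, "maybe".toList, "may be".toList,
   "i might".toList, "could be".toList, "it seems".toList]

def has_uncertainty_language_py (text : String) : Bool :=
  let lowered := (PySem.Str.lower text).toList
  pvWords.any (fun w => PySem.Chars.isIn w lowered)

-- ===== PORT B =====
-- one pass: at each position (suffix) test startswith against every phrase
def pvScan (cs : List Char) : Bool :=
  match cs with
  | [] => false
  | _ :: rest => pvWords.any (fun w => PySem.Chars.startswith cs w) || pvScan rest

def has_uncertainty_language_py_alt (text : String) : Bool :=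
  pvScan (PySem.Str.lower text).toList

-- ===== PRECONDITION & SPEC =====
def Spec_has_uncertainty_language_py (text : String) (out : Bool) : Prop := out = has_uncertainty_language_py_alt text
instance (text : String) (out : Bool) : Decidable (Spec_has_uncertainty_language_py text out) := by unfold Spec_has_uncertainty_language_py; infer_instance

-- ===== CLAIM (what is proved, stated in full; the proofs are below) =====
def Claim_equal_has_uncertainty_language_py : Prop := ∀ (text : String), Dom_has_uncertainty_language_py text → Spec_has_uncertainty_language_py text (has_uncertainty_language_py text)

-- ===== LEMMAS AND PROOFS =====

lemma pv_drop_cons_ex (w : List Char) (c : Char) (rest : List Char) :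
    (∃ j, w <+: (c :: rest).drop j) ↔ (w <+: c :: rest ∨ ∃ j, w <+: rest.drop j) := by
  constructor
  · rintro ⟨j, h⟩
    cases j with
    | zero => exact Or.inl (by simpa using h)
    | succ j => exact Or.inr ⟨j, by simpa using h⟩
  · rintro (h | ⟨j, h⟩)
    · exact ⟨0, by simpa using h⟩
    · exact ⟨j + 1, by simpa using h⟩

lemma pvWords_ne_nil : ∀ w ∈ pvWords, w ≠ [] := by decide

lemma pvScan_iff (cs : List Char) :
    pvScan cs = true ↔ ∃ w ∈ pvWords, ∃ j, w <+: cs.drop j := by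
  induction cs with
  | nil =>
    constructor
    · intro h; simp [pvScan] at h
    · rintro ⟨w, hw, j, h⟩
      exact absurd (List.prefix_nil.mp (by simpa using h)) (pvWords_ne_nil w hw)
  | cons c rest ih =>
    simp only [pvScan, Bool.or_eq_true, List.any_eq_true, ih,
      PySem.Chars.startswith_iff]
    constructor
    · rintro (⟨w, hw, h⟩ | ⟨w, hw, j, h⟩)
      · exact ⟨w, hw, (pv_drop_cons_ex w c rest).mpr (Or.inl h)⟩
      · exact ⟨w, hw, (pv_drop_cons_ex w c rest).mpr (Or.inr ⟨j, h⟩)⟩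
    · rintro ⟨w, hw, hj⟩
      rcases (pv_drop_cons_ex w c rest).mp hj with h | h
      · exact Or.inl ⟨w, hw, h⟩
      · exact Or.inr ⟨w, hw, h⟩

-- ===== VERDICT (by name: the statement is the Claim_ definition above) =====
theorem has_uncertainty_language_py_spec : Claim_equal_has_uncertainty_language_py := by
  intro text _
  unfold Spec_has_uncertainty_language_py has_uncertainty_language_py has_uncertainty_language_py_alt
  rw [Bool.eq_iff_iff, pvScan_iff]
  simp only [List.any_eq_true]
  constructor
  · rintro ⟨w, hw, h⟩
    exact ⟨w, hw, (PySem.Chars.exists_prefix_drop_iff_isIn w _).mpr h⟩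
  · rintro ⟨w, hw, h⟩
    exact ⟨w, hw, (PySem.Chars.exists_prefix_drop_iff_isIn w _).mp h⟩
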